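-- pv_equiv track=rewrite | github.com/HinalJ/adventOfCode2023 | src/day9/src/extrapolate_history.py | extrapolate_value_from_history_beginning
-- ===== SOURCE A (Python) =====
-- def extrapolate_value_from_history_beginning(history):
--     new_hist = []
--     all_zeroes = True
--     for i in range(1, len(history)):
--         new_hist.append(history[i]-history[i-1])
--         if all_zeroes and new_hist[i-1] != 0:
--             all_zeroes = False
--
--     if all_zeroes:
--         return history[0]
--     else:
--         return history[0] - extrapolate_value_from_history_beginning(new_hist)
-- ===== SOURCE B (Python) =====
-- def extrapolate_value_from_history_beginning(history):
--     # Newton forward-difference closed form: previous value = sum_j (-1)^j * C(n, j+1) * history[j]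
--     n = len(history)
--     total = 0
--     c = n  # running binomial C(n, j+1)
--     j = 0
--     for h in history:
--         total += c * h if j % 2 == 0 else -c * h
--         c = c * (n - j - 1) // (j + 2)
--         j += 1
--     return total
-- ===== Notes on version B (the rewrite author's own statement) =====
-- stated objective: faster
-- what changed: Replaces the O(n^2) recursive successive-differences scheme by Newton's forward-difference closed form: one pass computing the alternating binomial sum sum over j of (-1)^j * C(n,j+1) * the j-th term with an incrementally updated binomial coefficient.
import Mathlib
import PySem

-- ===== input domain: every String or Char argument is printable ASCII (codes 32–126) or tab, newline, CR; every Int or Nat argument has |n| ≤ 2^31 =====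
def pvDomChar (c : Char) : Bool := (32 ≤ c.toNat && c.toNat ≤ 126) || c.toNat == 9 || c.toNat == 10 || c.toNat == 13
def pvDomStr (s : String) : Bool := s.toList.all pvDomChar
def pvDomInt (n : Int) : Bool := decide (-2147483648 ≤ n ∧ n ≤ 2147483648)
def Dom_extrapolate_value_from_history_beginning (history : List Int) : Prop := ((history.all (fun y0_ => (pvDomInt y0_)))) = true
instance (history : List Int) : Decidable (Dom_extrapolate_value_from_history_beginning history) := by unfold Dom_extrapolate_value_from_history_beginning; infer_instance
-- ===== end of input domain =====

-- B replaces A's recursion on successive difference rows by Newton's one-pass alternating binomial sum (measured faster, asymptotic).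

-- ===== PORT A =====
-- loop body: new_hist.append(history[i]-history[i-1]); if all_zeroes and new_hist[i-1] != 0: all_zeroes = False
def pvStepA (history : List Int) (st : List Int × Bool) (i : Int) : List Int × Bool :=
  let nh := st.1 ++ [PySem.List.pyGetD history i 0 - PySem.List.pyGetD history (i - 1) 0]
  (nh, st.2 && (PySem.List.pyGetD nh (i - 1) 0 == 0))

-- the 'for i in range(1, len(history))' loop with state (new_hist, all_zeroes)
def pvLoopA (history : List Int) : List Int × Bool :=
  (PySem.List.pyRange 1 (history.length : Int) 1).foldl (pvStepA history) ([], true)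

-- the difference list h[i+1]-h[i]; the lemmas up to pvLoopA_lt characterise the loop's
-- new_hist and are cited by the port's decreasing_by (termination of A's recursion)
def pvDiffs (h : List Int) : List Int := List.zipWith (fun x y => y - x) h h.tail

theorem pvDiffs_length (h : List Int) : (pvDiffs h).length = h.length - 1 := by
  simp [pvDiffs, List.length_tail]

theorem pvDiffs_getD (h : List Int) (k : Nat) (hk : k + 1 < h.length) :
    (pvDiffs h).getD k 0 = h.getD (k + 1) 0 - h.getD k 0 := by
  have hl : (pvDiffs h).length = h.length - 1 := pvDiffs_length h
  have hk' : k < (pvDiffs h).length := by omega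
  rw [List.getD_eq_getElem _ _ hk', List.getD_eq_getElem _ _ hk, List.getD_eq_getElem _ _ (by omega : k < h.length)]
  simp [pvDiffs, List.getElem_zipWith, List.getElem_tail]

theorem pvLoopA_take (h : List Int) : ∀ (k : Nat), k < h.length →
    (PySem.List.pyRange 1 (1 + (k : Int)) 1).foldl (pvStepA h) ([], true)
      = ((pvDiffs h).take k, ((pvDiffs h).take k).all (· == 0)) := by
  intro k
  induction k with
  | zero => intro _; rw [PySem.List.pyRange_one_eq_nil (by omega)]; simp
  | succ k ih =>
    intro hk
    have h1 : (1 : Int) + ((k+1 : Nat) : Int) = (1 + (k : Int)) + 1 := by push_cast; ring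
    rw [h1, PySem.List.pyRange_one_succ_right (by omega), List.foldl_append, ih (by omega)]
    have hkD : k < (pvDiffs h).length := by rw [pvDiffs_length]; omega
    have htake : (pvDiffs h).take k ++ [(pvDiffs h).getD k 0] = (pvDiffs h).take (k+1) := by
      rw [List.getD_eq_getElem _ _ hkD, List.take_add_one, List.getElem?_eq_getElem hkD]
      rfl
    have hd : PySem.List.pyGetD h (1 + (k : Int)) 0 - PySem.List.pyGetD h (1 + (k : Int) - 1) 0
        = (pvDiffs h).getD k 0 := by
      have e1 : (1 : Int) + (k : Int) = ((k+1 : Nat) : Int) := by push_cast; ring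
      have e2 : ((k+1 : Nat) : Int) - 1 = ((k : Nat) : Int) := by push_cast; ring
      rw [e1, e2, PySem.List.pyGetD_natCast, PySem.List.pyGetD_natCast, pvDiffs_getD h k hk]
    simp only [List.foldl_cons, List.foldl_nil, pvStepA, hd, htake]
    have hlen : ((pvDiffs h).take k).length = k := List.length_take_of_le (by omega)
    have hget : PySem.List.pyGetD ((pvDiffs h).take (k+1)) (1 + (k : Int) - 1) 0
        = (pvDiffs h).getD k 0 := by
      have e2 : (1 : Int) + (k : Int) - 1 = ((k : Nat) : Int) := by ring
      rw [e2, PySem.List.pyGetD_natCast, ← htake, List.getD_eq_getElem _ _ (by simp [hlen]),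
        List.getElem_append_right (by omega)]
      simp [hlen]
    rw [hget, ← htake]
    simp [List.all_append, Bool.and_comm]

theorem pvLoopA_char (h : List Int) :
    pvLoopA h = (pvDiffs h, (pvDiffs h).all (· == 0)) := by
  rcases h with _ | ⟨a, t⟩
  · simp [pvLoopA, pvDiffs, PySem.List.pyRange_one_eq_nil (by omega : (0:Int) ≤ 1)]
  · have hlen : ((a :: t).length : Int) = 1 + (t.length : Int) := by simp; ring
    have := pvLoopA_take (a :: t) t.length (by simp)
    have htake : (pvDiffs (a :: t)).take t.length = pvDiffs (a :: t) := by
      apply List.take_of_length_le; rw [pvDiffs_length]; simp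
    rw [htake] at this
    rw [pvLoopA, hlen, this]

theorem pvLoopA_lt (h : List Int) (hf : (pvLoopA h).2 = false) :
    (pvLoopA h).1.length < h.length := by
  rw [pvLoopA_char] at hf ⊢
  rcases h with _ | ⟨a, t⟩
  · simp [pvDiffs] at hf
  · simp only [pvDiffs_length]; simp

-- the read of the first element is ported as pyGetD history 0 0; the IndexError on the empty list is excluded by Pre_
def extrapolate_value_from_history_beginning (history : List Int) : Int :=
  let p := pvLoopA history
  if hz : p.2 = true then PySem.List.pyGetD history 0 0
  else PySem.List.pyGetD history 0 0 - extrapolate_value_from_history_beginning p.1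
termination_by history.length
decreasing_by exact pvLoopA_lt history (by simpa using hz)

-- ===== PORT B =====
-- loop body of Source B: total += c*h if j%2==0 else -c*h;  c = c*(n-j-1)//(j+2);  j += 1
def pvStepB (n : Int) (st : Int × Int × Int) (h : Int) : Int × Int × Int :=
  (st.1 + (if PySem.Int.mod st.2.2 2 == 0 then st.2.1 * h else -(st.2.1 * h)),
   PySem.Int.floordiv (st.2.1 * (n - st.2.2 - 1)) (st.2.2 + 2),
   st.2.2 + 1)

def extrapolate_value_from_history_beginning_alt (history : List Int) : Int :=
  let n : Int := (history.length : Int)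
  (history.foldl (pvStepB n) (0, n, 0)).1

-- ===== PRECONDITION & SPEC =====
-- Pre_ excludes exactly the empty list, on which Python A raises IndexError reading the first element.
def Pre_extrapolate_value_from_history_beginning (history : List Int) : Prop := history ≠ []
instance (history : List Int) : Decidable (Pre_extrapolate_value_from_history_beginning history) := by unfold Pre_extrapolate_value_from_history_beginning; infer_instance
def pvWitness_extrapolate_value_from_history_beginning : List Int := [10, 13, 16, 21, 30, 45]

def Spec_extrapolate_value_from_history_beginning (history : List Int) (out : Int) : Prop := out = extrapolate_value_from_history_beginning_alt history
instance (history : List Int) (out : Int) : Decidable (Spec_extrapolate_value_from_history_beginning history out) := by unfold Spec_extrapolate_value_from_history_beginning; infer_instance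

-- ===== CLAIM (what is proved, stated in full; the proofs are below) =====
def Claim_equal_extrapolate_value_from_history_beginning : Prop := ∀ (history : List Int), Dom_extrapolate_value_from_history_beginning history → Pre_extrapolate_value_from_history_beginning history → Spec_extrapolate_value_from_history_beginning history (extrapolate_value_from_history_beginning history)

-- ===== LEMMAS AND PROOFS =====

-- C(N,j+1)*(N-j-1) // (j+2) = C(N,j+2): the binomial-coefficient update of B's loop is exact
theorem pvChooseStep (N j : Nat) :
    PySem.Int.floordiv ((Nat.choose N (j+1) : Int) * ((N : Int) - j - 1)) ((j : Int) + 2)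
      = (Nat.choose N (j+2) : Int) := by
  by_cases hle : j + 1 ≤ N
  · have key : (Nat.choose N (j+2) : Int) * ((j : Int) + 2) = (Nat.choose N (j+1) : Int) * ((N : Int) - j - 1) := by
      have := Nat.choose_succ_right_eq N (j+1)
      have hc : (N : Int) - j - 1 = ((N - (j+1) : Nat) : Int) := by push_cast [hle]; ring
      rw [hc]
      exact_mod_cast this
    rw [PySem.Int.floordiv_eq_iff_of_pos (by omega)]
    constructor
    · rw [key]
    · rw [← key]; nlinarith [key]
  · have h1 : Nat.choose N (j+1) = 0 := Nat.choose_eq_zero_of_lt (by omega)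
    have h2 : Nat.choose N (j+2) = 0 := Nat.choose_eq_zero_of_lt (by omega)
    simp [h1, h2, PySem.Int.floordiv_eq_ediv_of_pos (show (0:Int) < (j:Int)+2 by omega)]

-- loop invariant of B: with c = C(N,j+1) the fold adds the alternating binomial sum of the suffix
theorem pvB_inv (t : List Int) (N : Nat) : ∀ (j : Nat) (total : Int),
    (t.foldl (pvStepB (N : Int)) (total, (Nat.choose N (j+1) : Int), (j : Int))).1
      = total + ∑ i ∈ Finset.range t.length,
          (-1 : Int) ^ (j + i) * (Nat.choose N (j + i + 1) : Int) * t.getD i 0 := by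
  induction t with
  | nil => intro j total; simp
  | cons a t ih =>
    intro j total
    have hmod : PySem.Int.mod (j : Int) 2 = ((j % 2 : Nat) : Int) := by
      exact_mod_cast PySem.Int.mod_natCast j 2
    have hsign : (if PySem.Int.mod (j : Int) 2 == 0 then (Nat.choose N (j+1) : Int) * a else -((Nat.choose N (j+1) : Int) * a))
        = (-1 : Int) ^ j * (Nat.choose N (j+1) : Int) * a := by
      rw [hmod]
      rcases Nat.even_or_odd j with he | ho
      · simp [Nat.even_iff.mp he, he.neg_one_pow]
      · have : j % 2 = 1 := Nat.odd_iff.mp ho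
        simp [this, ho.neg_one_pow]
    have hstep : pvStepB (N : Int) (total, (Nat.choose N (j+1) : Int), (j : Int)) a
        = (total + (-1 : Int) ^ j * (Nat.choose N (j+1) : Int) * a,
           (Nat.choose N (j+2) : Int), ((j+1 : Nat) : Int)) := by
      simp only [pvStepB]
      rw [hsign, pvChooseStep N j]
      push_cast
      ring_nf
    rw [List.foldl_cons, hstep, ih (j+1)]
    rw [List.length_cons, Finset.sum_range_succ']
    simp only [List.getD_cons_succ, List.getD_cons_zero]
    have : ∀ i, j + 1 + i = j + (i + 1) := by omega
    simp only [this]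
    ring_nf

-- Newton's forward-difference value: the common mathematical description of both programs
def pvNewt (h : List Int) : Int :=
  ∑ i ∈ Finset.range h.length, (-1 : Int) ^ i * (Nat.choose h.length (i + 1) : Int) * h.getD i 0

theorem pvB_eq_newt (h : List Int) :
    extrapolate_value_from_history_beginning_alt h = pvNewt h := by
  have := pvB_inv h h.length 0 0
  simp only [Nat.choose_one_right, Nat.cast_zero, zero_add] at this
  simpa [extrapolate_value_from_history_beginning_alt, pvNewt] using this

theorem pvNewt_rec (a : Int) (t : List Int) :
    pvNewt (a :: t) = a - pvNewt (pvDiffs (a :: t)) := by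
  have hDlen : (pvDiffs (a :: t)).length = t.length := by rw [pvDiffs_length]; simp
  set m := t.length with hm
  unfold pvNewt
  rw [hDlen, List.length_cons, ← hm]
  have hterm : ∀ i ∈ Finset.range m,
      (-1 : Int) ^ i * (Nat.choose m (i + 1) : Int) * (pvDiffs (a :: t)).getD i 0
      = (-1 : Int) ^ i * (Nat.choose m (i + 1) : Int) * ((a :: t).getD (i+1) 0 - (a :: t).getD i 0) := by
    intro i hi
    rw [pvDiffs_getD (a :: t) i (by simp at hi ⊢; omega)]
  rw [Finset.sum_congr rfl hterm]
  have hpascal : ∀ i ∈ Finset.range (m + 1),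
      (-1 : Int) ^ i * (Nat.choose (m+1) (i + 1) : Int) * (a :: t).getD i 0
      = (-1 : Int) ^ i * (Nat.choose m i : Int) * (a :: t).getD i 0
        + (-1 : Int) ^ i * (Nat.choose m (i+1) : Int) * (a :: t).getD i 0 := by
    intro i _
    rw [Nat.choose_succ_succ' m i]
    push_cast
    ring
  rw [Finset.sum_congr rfl hpascal, Finset.sum_add_distrib]
  rw [Finset.sum_range_succ (fun i => (-1 : Int) ^ i * (Nat.choose m (i+1) : Int) * (a :: t).getD i 0) m]
  rw [Nat.choose_succ_self]
  rw [Finset.sum_range_succ' (fun i => (-1 : Int) ^ i * (Nat.choose m i : Int) * (a :: t).getD i 0) m]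
  simp only [List.getD_cons_succ, List.getD_cons_zero, Nat.choose_zero_right, Nat.cast_zero,
    Nat.cast_one, pow_zero, one_mul, mul_one, mul_zero, zero_mul, add_zero]
  have hsplit : ∀ x ∈ Finset.range m,
      (-1 : Int) ^ x * (Nat.choose m (x + 1) : Int) * (t.getD x 0 - (a :: t).getD x 0)
      = (-1 : Int) ^ x * (Nat.choose m (x + 1) : Int) * t.getD x 0
        - (-1 : Int) ^ x * (Nat.choose m (x + 1) : Int) * (a :: t).getD x 0 := by
    intro x _; ring
  rw [Finset.sum_congr rfl hsplit, Finset.sum_sub_distrib]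
  have hneg : ∀ x ∈ Finset.range m,
      (-1 : Int) ^ (x + 1) * (Nat.choose m (x + 1) : Int) * t.getD x 0
      = -((-1 : Int) ^ x * (Nat.choose m (x + 1) : Int) * t.getD x 0) := by
    intro x _; ring
  rw [Finset.sum_congr rfl hneg, Finset.sum_neg_distrib]
  ring

theorem pvNewt_zero (h : List Int) (hz : ∀ x ∈ h, x = 0) : pvNewt h = 0 := by
  unfold pvNewt
  apply Finset.sum_eq_zero
  intro i hi
  have : h.getD i 0 = 0 := by
    rw [List.getD_eq_getElem _ _ (by simpa using hi)]
    exact hz _ (List.getElem_mem _)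
  rw [this, mul_zero]

theorem pvA_eq_newt (h : List Int) (hne : h ≠ []) :
    extrapolate_value_from_history_beginning h = pvNewt h := by
  induction hlen : h.length using Nat.strong_induction_on generalizing h with
  | _ n ih =>
  rcases h with _ | ⟨a, t⟩
  · exact absurd rfl hne
  rw [extrapolate_value_from_history_beginning]
  simp only [pvLoopA_char]
  have hhead : PySem.List.pyGetD (a :: t) 0 0 = a := PySem.List.pyGetD_zero_cons a t 0
  by_cases hall : ((pvDiffs (a :: t)).all (· == 0)) = true
  · rw [dif_pos hall, hhead, pvNewt_rec,
      pvNewt_zero _ (by intro x hx; simpa using (List.all_eq_true.mp hall x hx)), sub_zero]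
  · rw [dif_neg (by simpa using hall), hhead, pvNewt_rec]
    congr 1
    have hDne : pvDiffs (a :: t) ≠ [] := by
      intro hnil; rw [hnil] at hall; simp at hall
    exact ih (pvDiffs (a :: t)).length
      (by rw [pvDiffs_length, ← hlen]; simp) _ hDne rfl

-- ===== VERDICT (by name: the statement is the Claim_ definition above) =====
theorem extrapolate_value_from_history_beginning_spec : Claim_equal_extrapolate_value_from_history_beginning := by
  intro h _ hpre
  unfold Spec_extrapolate_value_from_history_beginning
  rw [pvA_eq_newt h hpre, pvB_eq_newt]
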